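-- pv_equiv track=rewrite | github.com/jnemec91/AOC-2025 | day_6/main.py | part_two_formater
-- ===== SOURCE A (Python) =====
-- def part_two_formater(problem_data : list[str]) -> list[tuple]:
--     """
--         Arranges numbers in lists by the cephalophod rules.
--     """
--
--     all_data : list[tuple[str]]= []
--
--     for i in range(len(problem_data[0])): # expecting all lines to be same lenght
--         column_chars : list[str] = []
--         for line in problem_data:
--             if i < len(line):
--                 column_chars.append(line[i])
--
--         all_data.append(tuple(column_chars))
--
--     return all_data
-- ===== SOURCE B (Python) =====
-- def part_two_formater(problem_data: list[str]) -> list[tuple]: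
--     """Scatter each row's characters into per-column accumulators (single pass over the data)."""
--     ncols = len(problem_data[0])
--     columns = [[] for _ in range(ncols)]
--     for line in problem_data:
--         for i, ch in enumerate(line):
--             if i < ncols:
--                 columns[i].append(ch)
--     return [tuple(c) for c in columns]
-- ===== Notes on version B (the rewrite author's own statement) =====
-- stated objective: alternative
-- what changed: Instead of rescanning every line once per column (column-major gather via indexing), B makes a single row-major pass, scattering each character of each line into per-column accumulators; it trades the per-column rescans for per-character dispatch at the same overall cost.
import Mathlib
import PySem

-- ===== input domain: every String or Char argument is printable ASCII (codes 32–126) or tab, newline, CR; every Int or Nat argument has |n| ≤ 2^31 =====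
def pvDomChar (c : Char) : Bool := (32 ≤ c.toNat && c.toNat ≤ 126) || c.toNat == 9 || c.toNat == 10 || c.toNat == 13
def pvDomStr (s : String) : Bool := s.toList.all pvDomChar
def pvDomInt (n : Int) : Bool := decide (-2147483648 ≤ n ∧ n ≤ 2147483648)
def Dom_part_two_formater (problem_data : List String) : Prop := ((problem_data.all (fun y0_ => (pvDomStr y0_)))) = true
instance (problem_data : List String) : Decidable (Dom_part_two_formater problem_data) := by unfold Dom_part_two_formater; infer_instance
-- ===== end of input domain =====

-- B replaces A's column-major gather (one scan of all lines per column) by a single row-major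
-- pass scattering each character into per-column accumulators. Return-value equivalence only
-- (neither program mutates its argument). Python's 1-char string line[i] is modelled as
-- String.ofList [c] around PySem's Char-valued pyGet?.

-- ===== PORT A =====
def part_two_formater (problem_data : List String) : List (List String) :=
  -- problem_data[0] raises IndexError on []; Pre_ excludes the empty list, so getD's default is never used there
  let first := PySem.List.pyGetD problem_data 0 ""
  (PySem.List.pyRange 0 (PySem.Str.len first) 1).foldl
    (fun all_data i =>
      let column_chars := problem_data.foldl
        (fun col line =>
          if i < PySem.Str.len line then
            col ++ [String.ofList [(PySem.Str.pyGet? line i).getD ' ']]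
          else col) []
      all_data ++ [column_chars]) []

-- ===== PORT B =====
def part_two_formater_alt (problem_data : List String) : List (List String) :=
  let ncols := PySem.Str.len (PySem.List.pyGetD problem_data 0 "")
  let columns : List (List String) := List.replicate ncols.toNat []
  problem_data.foldl
    (fun cols line =>
      (PySem.List.enumerate line.toList).foldl
        (fun cols p =>
          if p.1 < ncols then cols.modify p.1.toNat (· ++ [String.ofList [p.2]]) else cols)
        cols)
    columns

-- ===== PRECONDITION & SPEC =====
-- Pre_ excludes only the empty list, on which both Pythons raise IndexError at problem_data[0].
def Pre_part_two_formater (problem_data : List String) : Prop := problem_data ≠ []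
instance (problem_data : List String) : Decidable (Pre_part_two_formater problem_data) := by unfold Pre_part_two_formater; infer_instance
def pvWitness_part_two_formater : List String := ["ab", "cd", "e"]

def Spec_part_two_formater (problem_data : List String) (out : List (List String)) : Prop := out = part_two_formater_alt problem_data
instance (problem_data : List String) (out : List (List String)) : Decidable (Spec_part_two_formater problem_data out) := by unfold Spec_part_two_formater; infer_instance

-- ===== CLAIM (what is proved, stated in full; the proofs are below) =====
def Claim_equal_part_two_formater : Prop := ∀ (problem_data : List String), Dom_part_two_formater problem_data → Pre_part_two_formater problem_data → Spec_part_two_formater problem_data (part_two_formater problem_data)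

-- ===== LEMMAS AND PROOFS =====

-- The column gathered for index j, as both programs produce it.
def pvCol (j : Nat) (pd : List String) : List String :=
  (pd.filter (fun line => decide ((j : Int) < PySem.Str.len line))).map
    (fun line => String.ofList [(line.toList[j]?).getD ' '])

-- A computes the map of pvCol over the column indices.
theorem portA_eq (pd : List String) :
    part_two_formater pd =
      (List.range (PySem.Str.len (PySem.List.pyGetD pd 0 "")).toNat).map (fun j => pvCol j pd) := by
  simp only [part_two_formater, PySem.List.pyRange_one, PySem.List.foldl_append_singleton_eq_map,
    List.nil_append, List.map_map]
  refine List.map_congr_left ?_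
  intro k hk
  simp only [Function.comp_apply, zero_add, sub_zero] at *
  rw [PySem.List.foldl_append_ite (p := fun line => (k : Int) < PySem.Str.len line)
      (f := fun line => String.ofList [(PySem.Str.pyGet? line (k : Int)).getD ' '])]
  simp [pvCol]

-- One line scattered into the accumulators, characterised element-wise.
theorem scatter_get (ncols : Int) (cs : List Char) :
    ∀ (m : Nat) (cols : List (List String)) (j : Nat),
      ((PySem.List.enumerate cs (m : Int)).foldl
        (fun cols p =>
          if p.1 < ncols then cols.modify p.1.toNat (· ++ [String.ofList [p.2]]) else cols)
        cols)[j]?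
      = cols[j]?.map (fun col =>
          if m ≤ j ∧ j < m + cs.length ∧ (j : Int) < ncols then
            col ++ [String.ofList [(cs[j - m]?).getD ' ']]
          else col) := by
  induction cs with
  | nil =>
    intro m cols j
    simp only [PySem.List.enumerate_nil, List.foldl_nil, List.length_nil]
    cases cols[j]? with
    | none => simp
    | some col => simp; intro h1 h2; omega
  | cons c cs ih =>
    intro m cols j
    rw [PySem.List.enumerate_cons]
    have hcast : (m : Int) + 1 = ((m + 1 : Nat) : Int) := by push_cast; ring
    simp only [List.foldl_cons, hcast]
    rw [ih (m + 1)]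
    by_cases hm : (m : Int) < ncols
    · simp only [if_pos hm, Int.toNat_natCast, List.getElem?_modify]
      cases hc : cols[j]? with
      | none => simp
      | some col =>
        simp only [Option.map_some, Option.map_eq_map, List.length_cons]
        by_cases hjm : m = j
        · subst hjm
          have h2 : ¬ (m + 1 ≤ m ∧ m < m + 1 + cs.length ∧ (m : Int) < ncols) := by omega
          have h1 : m ≤ m ∧ m < m + (cs.length + 1) ∧ (m : Int) < ncols := ⟨le_refl m, by omega, hm⟩
          simp only [if_neg h2, if_pos h1]
          simp
        · simp only [if_neg hjm]
          by_cases h2 : m + 1 ≤ j ∧ j < m + 1 + cs.length ∧ (j : Int) < ncols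
          · have h1 : m ≤ j ∧ j < m + (cs.length + 1) ∧ (j : Int) < ncols := by omega
            simp only [if_pos h2, if_pos h1]
            have hsub : j - m = (j - (m + 1)) + 1 := by omega
            rw [hsub, List.getElem?_cons_succ]
          · have h1 : ¬ (m ≤ j ∧ j < m + (cs.length + 1) ∧ (j : Int) < ncols) := by omega
            simp only [if_neg h2, if_neg h1]
    · simp only [if_neg hm]
      cases hc : cols[j]? with
      | none => simp
      | some col =>
        simp only [Option.map_some, List.length_cons]
        by_cases h2 : m + 1 ≤ j ∧ j < m + 1 + cs.length ∧ (j : Int) < ncols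
        · have h1 : m ≤ j ∧ j < m + (cs.length + 1) ∧ (j : Int) < ncols := by omega
          simp only [if_pos h2, if_pos h1]
          have hsub : j - m = (j - (m + 1)) + 1 := by omega
          rw [hsub, List.getElem?_cons_succ]
        · have h1 : ¬ (m ≤ j ∧ j < m + (cs.length + 1) ∧ (j : Int) < ncols) := by
            intro h1
            have : m = j := by omega
            subst this
            exact hm h1.2.2
          simp only [if_neg h2, if_neg h1]

-- The whole row-major pass, element-wise: each surviving column accumulates pvCol of the lines seen.
theorem portB_invariant (ncols : Int) :
    ∀ (pd : List String) (cols : List (List String)) (j : Nat),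
      (pd.foldl
        (fun cols line =>
          (PySem.List.enumerate line.toList).foldl
            (fun cols p =>
              if p.1 < ncols then cols.modify p.1.toNat (· ++ [String.ofList [p.2]]) else cols)
            cols)
        cols)[j]?
      = cols[j]?.map (fun col =>
          if (j : Int) < ncols then col ++ pvCol j pd else col) := by
  intro pd
  induction pd with
  | nil =>
    intro cols j
    cases hc : cols[j]? <;> simp [pvCol, hc]
  | cons line rest ih =>
    intro cols j
    simp only [List.foldl_cons]
    rw [ih]
    have h0 : ((0 : Nat) : Int) = (0 : Int) := rfl
    rw [show PySem.List.enumerate line.toList 0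
          = PySem.List.enumerate line.toList ((0 : Nat) : Int) from rfl]
    rw [scatter_get ncols line.toList 0 cols j]
    cases hc : cols[j]? with
    | none => simp
    | some col =>
      simp only [Option.map, Nat.zero_le, Nat.zero_add, true_and]
      by_cases hn : (j : Int) < ncols
      · simp only [if_pos hn]
        by_cases hl : j < line.toList.length
        · rw [if_pos ⟨hl, hn⟩]
          simp only [pvCol, List.filter_cons]
          have hcond : ((j : Int) < PySem.Str.len line) := by
            rw [PySem.Str.len_eq]; exact_mod_cast hl
          simp only [decide_eq_true hcond, List.append_assoc, List.cons_append,
            List.nil_append]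
          rfl
        · rw [if_neg (by intro h; exact hl h.1)]
          simp only [pvCol, List.filter_cons]
          have hcond : ¬ ((j : Int) < PySem.Str.len line) := by
            rw [PySem.Str.len_eq]
            intro h
            exact hl (by exact_mod_cast h)
          have hlen : ¬ j < line.length := by simpa using hl
          simp [hlen]
      · simp only [if_neg hn]
        rw [if_neg (by intro h; exact hn h.2)]

-- B computes the same map of pvCol.
theorem portB_eq (pd : List String) :
    part_two_formater_alt pd =
      (List.range (PySem.Str.len (PySem.List.pyGetD pd 0 "")).toNat).map (fun j => pvCol j pd) := by
  unfold part_two_formater_alt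
  apply List.ext_getElem?
  intro j
  rw [portB_invariant]
  set n := (PySem.Str.len (PySem.List.pyGetD pd 0 "")).toNat with hn
  by_cases hj : j < n
  · have hrep : (List.replicate n ([] : List String))[j]? = some [] := by
      simp [hj]
    have hint : (j : Int) < PySem.Str.len (PySem.List.pyGetD pd 0 "") := by
      have h0 : (0 : Int) ≤ PySem.Str.len (PySem.List.pyGetD pd 0 "") := by
        rw [PySem.Str.len_eq]; positivity
      omega
    rw [hrep]
    simp only [Option.map_some, if_pos hint, List.nil_append]
    rw [List.getElem?_map, List.getElem?_range hj]
    rfl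
  · have hrep : (List.replicate n ([] : List String))[j]? = none := by
      simp [List.getElem?_replicate]; omega
    rw [hrep]
    simp only [Option.map_none]
    rw [List.getElem?_map]
    simp
    omega

-- ===== VERDICT (by name: the statement is the Claim_ definition above) =====
theorem part_two_formater_spec : Claim_equal_part_two_formater := by
  intro pd _ _
  unfold Spec_part_two_formater
  rw [portA_eq, portB_eq]
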